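-- pv_equiv track=rewrite | github.com/wdhg/advent-of-code | 2017/day_02/part_2.py | row_divided_result
-- ===== SOURCE A (Python) =====
-- def row_divided_result(row):
--     result = 0
--     for a in range(len(row)):
--         for b in range(len(row)):
--             if a == b:
--                 continue
--             result += row[b] // row[a] if row[b] % row[a] == 0 else 0
--     return result
-- ===== SOURCE B (Python) =====
-- def row_divided_result(row):
--     counts = {}
--     for x in row:
--         counts[x] = counts.get(x, 0) + 1
--     result = 0
--     for v, cv in counts.items():
--         result += cv * (cv - 1)
--         for w, cw in counts.items():
--             if w != v and w % v == 0:
--                 result += (w // v) * cv * cw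
--     return result
-- ===== Notes on version B (the rewrite author's own statement) =====
-- stated objective: faster
-- what changed: B groups the row into a value->count table built in one pass and sums quotients over ordered pairs of distinct values weighted by their counts (plus c*(c-1) for equal-value pairs), replacing A's scan over all ordered index pairs.
import Mathlib
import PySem

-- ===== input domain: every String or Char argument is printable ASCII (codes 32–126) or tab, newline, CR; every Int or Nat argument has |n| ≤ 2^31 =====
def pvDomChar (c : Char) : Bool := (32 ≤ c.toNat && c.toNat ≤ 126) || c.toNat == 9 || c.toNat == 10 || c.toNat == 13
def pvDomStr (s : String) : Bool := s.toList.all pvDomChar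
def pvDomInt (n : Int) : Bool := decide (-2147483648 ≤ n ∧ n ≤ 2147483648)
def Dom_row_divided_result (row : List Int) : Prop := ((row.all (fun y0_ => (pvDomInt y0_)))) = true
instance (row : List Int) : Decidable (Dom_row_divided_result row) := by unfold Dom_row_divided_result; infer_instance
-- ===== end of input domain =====

-- B replaces A's scan over all ordered index pairs by a value->count table built in one pass,
-- summing over ordered pairs of distinct values weighted by counts (faster on rows with repeated values).

-- ===== PORT A =====
def row_divided_result (row : List Int) : Int :=
  (PySem.List.pyRange 0 (row.length : Int) 1).foldl (fun result a =>
    (PySem.List.pyRange 0 (row.length : Int) 1).foldl (fun result b =>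
      if a == b then result
      else result +
        (if PySem.Int.mod (PySem.List.pyGetD row b 0) (PySem.List.pyGetD row a 0) == 0 then
          PySem.Int.floordiv (PySem.List.pyGetD row b 0) (PySem.List.pyGetD row a 0)
        else 0)) result) 0

-- ===== PORT B =====
def row_divided_result_alt (row : List Int) : Int :=
  let counts : PySem.Dict Int Int :=
    row.foldl (fun d x => d.insert x (d.getD x 0 + 1)) PySem.Dict.empty
  counts.items.foldl (fun result p =>
    counts.items.foldl (fun result q =>
      if q.1 != p.1 && PySem.Int.mod q.1 p.1 == 0 then
        result + PySem.Int.floordiv q.1 p.1 * p.2 * q.2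
      else result) (result + p.2 * (p.2 - 1))) 0

-- ===== PRECONDITION & SPEC =====
-- Pre_ excludes exactly the inputs where Python A raises ZeroDivisionError: a 0 in a row of length ≥ 2.
def Pre_row_divided_result (row : List Int) : Prop := (0 : Int) ∈ row → row.length ≤ 1
instance (row : List Int) : Decidable (Pre_row_divided_result row) := by unfold Pre_row_divided_result; infer_instance
def pvWitness_row_divided_result : List Int := ([2, 4, 8] : List Int)

def Spec_row_divided_result (row : List Int) (out : Int) : Prop := out = row_divided_result_alt row
instance (row : List Int) (out : Int) : Decidable (Spec_row_divided_result row out) := by unfold Spec_row_divided_result; infer_instance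

-- ===== CLAIM (what is proved, stated in full; the proofs are below) =====
def Claim_equal_row_divided_result : Prop := ∀ (row : List Int), Dom_row_divided_result row → Pre_row_divided_result row → Spec_row_divided_result row (row_divided_result row)

-- ===== LEMMAS AND PROOFS =====

-- the per-pair contribution of both programs: y // x when x divides y, else 0
def pvG (x y : Int) : Int :=
  if PySem.Int.mod y x == 0 then PySem.Int.floordiv y x else 0

theorem pvG_self (x : Int) (hx : x ≠ 0) : pvG x x = 1 := by
  have hm : PySem.Int.mod x x = 0 := (PySem.Int.mod_eq_zero_iff_dvd x x).mpr dvd_rfl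
  have hd : PySem.Int.floordiv x x * x + PySem.Int.mod x x = x := PySem.Int.floordiv_mul_add_mod x x
  rw [hm, add_zero] at hd
  have : PySem.Int.floordiv x x * x = 1 * x := by rw [hd, one_mul]
  have h1 : PySem.Int.floordiv x x = 1 := mul_right_cancel₀ hx this
  simp [pvG, hm, h1]

-- picking the unique matching element out of a duplicate-free list
theorem pvSumPick (u : List Int) (hu : u.Nodup) (a : Int) (ha : a ∈ u) (F : Int → Int) :
    (u.map (fun b => if a = b then F b else 0)).sum = F a := by
  induction u with
  | nil => cases ha
  | cons x t ih =>
    rw [List.nodup_cons] at hu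
    rcases List.mem_cons.mp ha with h | h
    · subst h
      have : (t.map (fun b => if a = b then F b else 0)).sum = 0 := by
        apply List.sum_eq_zero; intro y hy
        rcases List.mem_map.mp hy with ⟨b, hb, rfl⟩
        simp only [ite_eq_right_iff]; intro he; exact absurd (he ▸ hb) hu.1
      simp [this]
    · have hax : a ≠ x := fun he => hu.1 (he ▸ h)
      simp [List.map_cons, List.sum_cons, hax, ih hu.2 h]

theorem pvSumMapSub (u : List Int) (f g : Int → Int) :
    (u.map (fun v => f v - g v)).sum = (u.map f).sum - (u.map g).sum := by
  induction u with
  | nil => simp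
  | cons x t ih => simp [ih]; ring

-- grouping a sum over the list by distinct values with multiplicities
theorem pvSumGroup (l : List Int) (u : List Int) (hu : u.Nodup) (hsub : ∀ x ∈ l, x ∈ u)
    (f : Int → Int) :
    (l.map f).sum = (u.map (fun v => (l.count v : Int) * f v)).sum := by
  induction l with
  | nil => simp
  | cons x t ih =>
    have hsub' : ∀ y ∈ t, y ∈ u := fun y hy => hsub y (List.mem_cons_of_mem _ hy)
    have hx : x ∈ u := hsub x List.mem_cons_self
    have hcongr : ∀ v ∈ u, ((x :: t).count v : Int) * f v
        = (t.count v : Int) * f v + (if x = v then f v else 0) := by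
      intro v _
      rw [List.count_cons]
      by_cases hxv : v = x
      · subst hxv; simp; ring
      · have : ¬ x = v := fun he => hxv he.symm
        simp [this]
    rw [List.map_cons, List.sum_cons, List.map_congr_left hcongr,
        PySem.List.sum_map_add_int, ← ih hsub', pvSumPick u hu x hx f]
    ring

theorem pvSumCount (l : List Int) (u : List Int) (hu : u.Nodup) (hsub : ∀ x ∈ l, x ∈ u) :
    (u.map (fun v => (l.count v : Int))).sum = (l.length : Int) := by
  have h := pvSumGroup l u hu hsub (fun _ => 1)
  simp at h
  rw [← h]

-- A as a double sum over the index range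
theorem pvA_idx (row : List Int) :
    row_divided_result row =
      ((PySem.List.pyRange 0 (row.length : Int) 1).map (fun a =>
        ((PySem.List.pyRange 0 (row.length : Int) 1).map (fun b =>
          if a = b then 0 else pvG (PySem.List.pyGetD row a 0) (PySem.List.pyGetD row b 0))).sum)).sum := by
  unfold row_divided_result
  have hinner : ∀ (a init : Int),
      (PySem.List.pyRange 0 (row.length : Int) 1).foldl (fun result b =>
        if a == b then result
        else result +
          (if PySem.Int.mod (PySem.List.pyGetD row b 0) (PySem.List.pyGetD row a 0) == 0 then
            PySem.Int.floordiv (PySem.List.pyGetD row b 0) (PySem.List.pyGetD row a 0)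
          else 0)) init
      = init + ((PySem.List.pyRange 0 (row.length : Int) 1).map (fun b =>
          if a = b then 0 else pvG (PySem.List.pyGetD row a 0) (PySem.List.pyGetD row b 0))).sum := by
    intro a init
    rw [PySem.List.foldl_congr_mem (g := fun result b => result +
        (if a = b then 0 else pvG (PySem.List.pyGetD row a 0) (PySem.List.pyGetD row b 0)))]
    · exact PySem.List.foldl_add _ _ _
    · intro acc b _
      by_cases h : a = b <;> simp [h, pvG]
  calc (PySem.List.pyRange 0 (row.length : Int) 1).foldl _ 0
      = (PySem.List.pyRange 0 (row.length : Int) 1).foldl (fun result a => result +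
          ((PySem.List.pyRange 0 (row.length : Int) 1).map (fun b =>
            if a = b then 0 else pvG (PySem.List.pyGetD row a 0) (PySem.List.pyGetD row b 0))).sum) 0 := by
        exact PySem.List.foldl_congr_mem _ _ _ _ (fun acc a _ => hinner a acc)
    _ = _ := by rw [PySem.List.foldl_add]; simp

-- A as a double sum over elements, minus the diagonal
theorem pvA_eq (row : List Int) :
    row_divided_result row =
      (row.map (fun x => (row.map (fun y => pvG x y)).sum)).sum
        - (row.map (fun x => pvG x x)).sum := by
  rw [pvA_idx]
  have hR : (PySem.List.pyRange 0 (row.length : Int) 1).map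
      (fun j => PySem.List.pyGetD row j 0) = row := PySem.List.map_pyGetD_pyRange_zero' row 0
  have hnd : (PySem.List.pyRange 0 (row.length : Int) 1).Nodup := PySem.List.nodup_pyRange_one 0 _
  have hout : ∀ a ∈ PySem.List.pyRange 0 (row.length : Int) 1,
      ((PySem.List.pyRange 0 (row.length : Int) 1).map (fun b =>
        if a = b then 0 else pvG (PySem.List.pyGetD row a 0) (PySem.List.pyGetD row b 0))).sum
      = (fun x => (row.map (fun y => pvG x y)).sum - pvG x x) (PySem.List.pyGetD row a 0) := by
    intro a ha
    have hpt : ∀ b ∈ PySem.List.pyRange 0 (row.length : Int) 1,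
        (if a = b then 0 else pvG (PySem.List.pyGetD row a 0) (PySem.List.pyGetD row b 0))
        = (fun b => pvG (PySem.List.pyGetD row a 0) (PySem.List.pyGetD row b 0)) b
          - (fun b => if a = b then pvG (PySem.List.pyGetD row a 0) (PySem.List.pyGetD row b 0) else 0) b := by
      intro b _; by_cases h : a = b <;> simp [h]
    rw [List.map_congr_left hpt, pvSumMapSub, pvSumPick _ hnd a ha]
    have : (PySem.List.pyRange 0 (row.length : Int) 1).map
        (fun b => pvG (PySem.List.pyGetD row a 0) (PySem.List.pyGetD row b 0))
        = row.map (pvG (PySem.List.pyGetD row a 0)) := by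
      rw [show (fun b => pvG (PySem.List.pyGetD row a 0) (PySem.List.pyGetD row b 0))
          = (pvG (PySem.List.pyGetD row a 0)) ∘ (fun j => PySem.List.pyGetD row j 0) from rfl,
        ← List.map_map, hR]
    rw [this]
  rw [List.map_congr_left hout,
      show (fun a => (fun x => (row.map (fun y => pvG x y)).sum - pvG x x) (PySem.List.pyGetD row a 0))
        = (fun x => (row.map (fun y => pvG x y)).sum - pvG x x) ∘ (fun j => PySem.List.pyGetD row j 0) from rfl,
      ← List.map_map, hR, pvSumMapSub]

-- B as a double sum over the distinct values
theorem pvB_eq (row : List Int) :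
    row_divided_result_alt row =
      ((PySem.Set.ofList row).map (fun v =>
        (row.count v : Int) * ((row.count v : Int) - 1) +
          ((PySem.Set.ofList row).map (fun w =>
            if w ≠ v ∧ PySem.Int.mod w v = 0 then
              PySem.Int.floordiv w v * (row.count v : Int) * (row.count w : Int)
            else 0)).sum)).sum := by
  unfold row_divided_result_alt
  simp only []
  rw [show row.foldl (fun d x => d.insert x (d.getD x 0 + 1)) PySem.Dict.empty
      = PySem.Dict.counter row from PySem.Dict.foldl_insert_getD_add_one_eq_counter row]
  rw [PySem.Dict.items_counter]
  rw [List.foldl_map]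
  have hinner : ∀ (v cv init : Int),
      List.foldl (fun result q =>
        if q.1 != v && PySem.Int.mod q.1 v == 0 then
          result + PySem.Int.floordiv q.1 v * cv * q.2
        else result) init
        ((PySem.Set.ofList row).map (fun k => (k, (row.count k : Int))))
      = init + ((PySem.Set.ofList row).map (fun w =>
          if w ≠ v ∧ PySem.Int.mod w v = 0 then
            PySem.Int.floordiv w v * cv * (row.count w : Int)
          else 0)).sum := by
    intro v cv init
    rw [List.foldl_map]
    rw [PySem.List.foldl_congr_mem _ _ (fun result w => result +
        (if w ≠ v ∧ PySem.Int.mod w v = 0 then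
          PySem.Int.floordiv w v * cv * (row.count w : Int) else 0)) _ ?_]
    · exact PySem.List.foldl_add _ _ _
    · intro acc w _
      by_cases h1 : w = v
      · simp [h1]
      · by_cases h2 : PySem.Int.mod w v = 0 <;> simp [h1, h2]
  rw [PySem.List.foldl_congr_mem _ _ (fun result v =>
      result + ((row.count v : Int) * ((row.count v : Int) - 1) +
        ((PySem.Set.ofList row).map (fun w =>
          if w ≠ v ∧ PySem.Int.mod w v = 0 then
            PySem.Int.floordiv w v * (row.count v : Int) * (row.count w : Int)
          else 0)).sum)) _ ?_]
  · rw [PySem.List.foldl_add]; simp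
  · intro acc v _
    rw [hinner v (row.count v : Int) (acc + (row.count v : Int) * ((row.count v : Int) - 1))]
    ring

-- the main case: no zero in the row
theorem pvMain (row : List Int) (hz : (0 : Int) ∉ row) :
    row_divided_result row = row_divided_result_alt row := by
  have hu : (PySem.Set.ofList row).Nodup := PySem.Set.nodup_ofList row
  have hsub : ∀ x ∈ row, x ∈ PySem.Set.ofList row := fun x hx => (PySem.Set.mem_ofList row x).mpr hx
  set U := PySem.Set.ofList row with hU
  set c : Int → Int := fun v => (row.count v : Int) with hc
  -- per-value equality between B's summand and the grouped form of A's summand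
  have hper : ∀ v ∈ U,
      c v * (c v - 1) +
        (U.map (fun w => if w ≠ v ∧ PySem.Int.mod w v = 0 then
          PySem.Int.floordiv w v * c v * c w else 0)).sum
      = (fun v => c v * ((U.map (fun w => c w * pvG v w)).sum) - c v) v := by
    intro v hv
    have hv0 : v ≠ 0 := fun he => hz (he ▸ ((PySem.Set.mem_ofList row v).mp hv))
    have hpt : ∀ w ∈ U,
        (if w ≠ v ∧ PySem.Int.mod w v = 0 then PySem.Int.floordiv w v * c v * c w else 0)
        = (fun w => c v * (c w * pvG v w)) w - (fun w => if v = w then c v * (c w * pvG v w) else 0) w := by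
      intro w _
      by_cases h1 : w = v
      · subst h1; simp
      · have h1' : ¬ v = w := fun he => h1 he.symm
        by_cases h2 : PySem.Int.mod w v = 0 <;> simp [pvG, h1, h1', h2] <;> ring
    rw [List.map_congr_left hpt, pvSumMapSub, pvSumPick U hu v hv,
        PySem.List.sum_map_const_mul_int, pvG_self v hv0]
    ring
  rw [pvA_eq, pvB_eq]
  have hdiag : (row.map (fun x => pvG x x)).sum = (row.length : Int) := by
    have : ∀ x ∈ row, pvG x x = (fun _ => (1 : Int)) x := by
      intro x hx; exact pvG_self x (fun he => hz (he ▸ hx))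
    rw [List.map_congr_left this]; simp
  have houter : (row.map (fun x => (row.map (fun y => pvG x y)).sum)).sum
      = (U.map (fun v => c v * ((U.map (fun w => c w * pvG v w)).sum))).sum := by
    rw [pvSumGroup row U hu hsub]
    apply congrArg
    apply List.map_congr_left
    intro v _
    rw [pvSumGroup row U hu hsub (fun y => pvG v y)]
  rw [hdiag, houter, List.map_congr_left hper, pvSumMapSub,
      pvSumCount row U hu hsub]

-- ===== VERDICT (by name: the statement is the Claim_ definition above) =====
theorem row_divided_result_spec : Claim_equal_row_divided_result := by
  intro row _ hpre
  unfold Spec_row_divided_result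
  by_cases hz : (0 : Int) ∈ row
  · have := hpre hz
    match row, this with
    | [], _ => decide
    | [x], _ =>
      rw [pvA_eq [x], pvB_eq [x]]
      simp [PySem.Set.ofList, PySem.Set.add]
  · exact pvMain row hz
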